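-- pv_equiv track=rewrite | github.com/MrBrantCode/unitest_baseline | mut_generate/mist_train_taco/taco_9473/solution.py | calculate_max_costs
-- ===== SOURCE A (Python) =====
-- def calculate_max_costs(N, items):
--     ones = []
--     twos = []
--
--     for W, C in items:
--         if W == 1:
--             ones.append(C)
--         else:
--             twos.append(C)
--
--     max_weight = len(ones) + 2 * len(twos)
--
--     if len(ones) >= 1:
--         ones.append(0)
--         ones.sort(reverse=True)
--         even_twos = twos.copy()
--         odd_twos = twos.copy()
--
--         for i in range(1, len(ones)):
--             if i % 2 == 1:
--                 even_twos.append(ones[i] + ones[i - 1])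
--             else:
--                 odd_twos.append(ones[i] + ones[i - 1])
--
--         even_twos = sorted(even_twos)
--         odd_twos = sorted(odd_twos)
--
--         res = [0, ones[0]]
--         for w in range(2, max_weight + 1):
--             if w % 2 == 0:
--                 temp = even_twos.pop()
--             else:
--                 temp = odd_twos.pop()
--             res.append(res[w - 2] + temp)
--     else:
--         res = [0, 0]
--         twos = sorted(twos)
--
--         for w in range(2, max_weight + 1):
--             temp = 0
--             if w % 2 == 0:
--                 temp = twos.pop()
--             res.append(max(res[w - 2] + temp, res[w - 1]))
--
--     res.pop(0)
--     return res
-- ===== SOURCE B (Python) =====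
-- def prefix_sums(l):
--     pre = [0]
--     s = 0
--     for x in l:
--         s += x
--         pre.append(s)
--     return pre
--
--
-- def calculate_max_costs(N, items):
--     ones = [c for w, c in items if w == 1]
--     twos = [c for w, c in items if w != 1]
--     max_weight = len(ones) + 2 * len(twos)
--     n = max(max_weight, 1)
--     if ones:
--         ones1 = sorted(ones + [0], reverse=True)
--         pairs = [a + b for a, b in zip(ones1[1:], ones1)]
--         epre = prefix_sums(sorted(twos + pairs[0::2], reverse=True))
--         opre = prefix_sums(sorted(twos + pairs[1::2], reverse=True))
--         top = ones1[0]
--         return [epre[w // 2] if w % 2 == 0 else top + opre[(w - 1) // 2]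
--                 for w in range(1, n + 1)]
--     else:
--         gains = prefix_sums([max(t, 0) for t in sorted(twos, reverse=True)])
--         return [gains[w // 2] for w in range(1, n + 1)]
-- ===== Notes on version B (the rewrite author's own statement) =====
-- stated objective: alternative
-- what changed: B replaces A's stateful interleaved pop-and-append loop over res with closed-form interleaved prefix sums: it sorts each gain stream descending once and reads every answer directly as a prefix-sum (ones branch) or clamped-prefix-sum (twos branch) at index w//2, with no mutable res list or pop bookkeeping.
import Mathlib
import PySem

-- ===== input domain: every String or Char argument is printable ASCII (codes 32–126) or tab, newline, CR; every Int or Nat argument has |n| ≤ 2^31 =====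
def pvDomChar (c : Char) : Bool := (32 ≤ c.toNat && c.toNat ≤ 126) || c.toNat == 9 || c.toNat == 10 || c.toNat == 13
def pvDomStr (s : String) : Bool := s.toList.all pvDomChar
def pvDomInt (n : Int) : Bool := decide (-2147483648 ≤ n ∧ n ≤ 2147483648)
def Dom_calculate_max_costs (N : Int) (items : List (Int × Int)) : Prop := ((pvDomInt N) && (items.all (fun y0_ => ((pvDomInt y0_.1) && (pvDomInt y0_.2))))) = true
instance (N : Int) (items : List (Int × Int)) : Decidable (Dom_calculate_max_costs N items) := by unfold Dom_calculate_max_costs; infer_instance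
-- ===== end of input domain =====

-- B re-derives each answer as interleaved prefix sums over the two sorted gain streams
-- instead of A's stateful pop-and-append loop; objective: alternative decomposition (not timed faster).

-- ===== PORT A =====
-- A-side helpers: the bodies of A's three for-loops, named so the fold structure stays literal.
def aPartStep (s : List Int × List Int) (wc : Int × Int) : List Int × List Int :=
  if wc.1 == 1 then (s.1 ++ [wc.2], s.2) else (s.1, s.2 ++ [wc.2])

def aPairStep (l : List Int) (s : List Int × List Int) (i : Int) : List Int × List Int :=
  if PySem.Int.mod i 2 == 1 then
    (s.1 ++ [PySem.List.pyGetD l i 0 + PySem.List.pyGetD l (i - 1) 0], s.2)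
  else
    (s.1, s.2 ++ [PySem.List.pyGetD l i 0 + PySem.List.pyGetD l (i - 1) 0])

def aStep1 (s : List Int × List Int × List Int) (w : Int) : List Int × List Int × List Int :=
  if PySem.Int.mod w 2 == 0 then
    match PySem.List.pop? s.1 with
    | some (temp, ev') => (ev', s.2.1, s.2.2 ++ [PySem.List.pyGetD s.2.2 (w - 2) 0 + temp])
    | none => s
  else
    match PySem.List.pop? s.2.1 with
    | some (temp, od') => (s.1, od', s.2.2 ++ [PySem.List.pyGetD s.2.2 (w - 2) 0 + temp])
    | none => s

def aStep2 (s : List Int × List Int) (w : Int) : List Int × List Int :=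
  if PySem.Int.mod w 2 == 0 then
    match PySem.List.pop? s.1 with
    | some (temp, tw') =>
        (tw', s.2 ++ [max (PySem.List.pyGetD s.2 (w - 2) 0 + temp) (PySem.List.pyGetD s.2 (w - 1) 0)])
    | none => s
  else
    (s.1, s.2 ++ [max (PySem.List.pyGetD s.2 (w - 2) 0 + 0) (PySem.List.pyGetD s.2 (w - 1) 0)])

def calculate_max_costs (N : Int) (items : List (Int × Int)) : List Int :=
  let p := items.foldl aPartStep ([], [])
  let ones := p.1
  let twos := p.2
  let max_weight : Int := (ones.length : Int) + 2 * (twos.length : Int)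
  if 1 ≤ ones.length then
    let ones1 := PySem.List.sorted (ones ++ [0]) (fun x => x) true
    let st := (PySem.List.pyRange 1 (ones1.length : Int)).foldl (aPairStep ones1) (twos, twos)
    let even_twos := PySem.List.sorted st.1 (fun x => x) false
    let odd_twos := PySem.List.sorted st.2 (fun x => x) false
    let fin := (PySem.List.pyRange 2 (max_weight + 1)).foldl aStep1
      (even_twos, odd_twos, [0, PySem.List.pyGetD ones1 0 0])
    fin.2.2.drop 1
  else
    let twos2 := PySem.List.sorted twos (fun x => x) false
    let fin := (PySem.List.pyRange 2 (max_weight + 1)).foldl aStep2 (twos2, [0, 0])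
    fin.2.drop 1

-- ===== PORT B =====
-- B-side helpers.
def prefix_sums (l : List Int) : List Int :=
  (l.foldl (fun (p : List Int × Int) x => (p.1 ++ [p.2 + x], p.2 + x)) ([0], 0)).1

-- everyOther l / everyOther (l.drop 1) port the step-2 slices l[0::2] / l[1::2] exactly.
def everyOther : List Int → List Int
  | [] => []
  | [x] => [x]
  | x :: _ :: xs => x :: everyOther xs

def calculate_max_costs_alt (N : Int) (items : List (Int × Int)) : List Int :=
  let ones := (items.filter (fun wc => wc.1 == 1)).map (·.2)
  let twos := (items.filter (fun wc => wc.1 != 1)).map (·.2)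
  let max_weight := ones.length + 2 * twos.length
  let n := max max_weight 1
  if !ones.isEmpty then
    let ones1 := PySem.List.sorted (ones ++ [0]) (fun x => x) true
    let pairs := List.zipWith (· + ·) (ones1.drop 1) ones1
    let epre := prefix_sums (PySem.List.sorted (twos ++ everyOther pairs) (fun x => x) true)
    let opre := prefix_sums (PySem.List.sorted (twos ++ everyOther (pairs.drop 1)) (fun x => x) true)
    let top := ones1.getD 0 0
    (List.range n).map (fun i =>
      let w := i + 1
      if w % 2 == 0 then epre.getD (w / 2) 0 else top + opre.getD ((w - 1) / 2) 0)
  else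
    let gains := prefix_sums ((PySem.List.sorted twos (fun x => x) true).map (fun t => max t 0))
    (List.range n).map (fun i => gains.getD ((i + 1) / 2) 0)

-- ===== PRECONDITION & SPEC =====
def Spec_calculate_max_costs (N : Int) (items : List (Int × Int)) (out : List Int) : Prop := out = calculate_max_costs_alt N items
instance (N : Int) (items : List (Int × Int)) (out : List Int) : Decidable (Spec_calculate_max_costs N items out) := by unfold Spec_calculate_max_costs; infer_instance

-- ===== CLAIM (what is proved, stated in full; the proofs are below) =====
def Claim_equal_calculate_max_costs : Prop := ∀ (N : Int) (items : List (Int × Int)), Dom_calculate_max_costs N items → Spec_calculate_max_costs N items (calculate_max_costs N items)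

-- ===== LEMMAS AND PROOFS =====

def stepN {σ : Type} (step : σ → σ) : Nat → σ → σ
  | 0, st => st
  | n + 1, st => step (stepN step n st)

def stepA (s : List Int × List Int × List Int) : List Int × List Int × List Int :=
  if s.2.2.length % 2 == 0 then
    match PySem.List.pop? s.1 with
    | some (temp, ev') => (ev', s.2.1, s.2.2 ++ [s.2.2.getD (s.2.2.length - 2) 0 + temp])
    | none => s
  else
    match PySem.List.pop? s.2.1 with
    | some (temp, od') => (s.1, od', s.2.2 ++ [s.2.2.getD (s.2.2.length - 2) 0 + temp])
    | none => s

def gA (E' O' : List Int) (r1 : Int) (w : Nat) : Int :=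
  if w % 2 == 0 then (prefix_sums E').getD (w / 2) 0
  else r1 + (prefix_sums O').getD ((w - 1) / 2) 0

def stepC (s : List Int × List Int) : List Int × List Int :=
  if s.2.length % 2 == 0 then
    match PySem.List.pop? s.1 with
    | some (temp, tw') =>
        (tw', s.2 ++ [max (s.2.getD (s.2.length - 2) 0 + temp) (s.2.getD (s.2.length - 1) 0)])
    | none => s
  else
    (s.1, s.2 ++ [max (s.2.getD (s.2.length - 2) 0 + 0) (s.2.getD (s.2.length - 1) 0)])

def hC (T' : List Int) (w : Nat) : Int :=
  (prefix_sums (T'.map (fun t => max t 0))).getD (w / 2) 0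

lemma sorted_true_eq_rev (l : List Int) :
    PySem.List.sorted l (fun x => x) true = (PySem.List.sorted l (fun x => x) false).reverse := by
  apply PySem.List.eq_of_perm_of_pairwise_le_of_injective (key := fun x : Int => -x) neg_injective
  · exact (PySem.List.sorted_perm l _ true).trans
      ((PySem.List.sorted_perm l _ false).symm.trans (List.reverse_perm _).symm)
  · exact (PySem.List.sorted_pairwise_rev l (fun x : Int => x)).imp (by intro a b h; simpa using h)
  · rw [List.pairwise_reverse]
    exact (PySem.List.sorted_pairwise l (fun x : Int => x)).imp (by intro a b h; simpa using h)

lemma prefix_sums_aux (l : List Int) : ∀ (acc : List Int) (s : Int),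
    l.foldl (fun (p : List Int × Int) x => (p.1 ++ [p.2 + x], p.2 + x)) (acc, s)
      = (acc ++ (List.range l.length).map (fun k => s + (l.take (k + 1)).sum), s + l.sum) := by
  induction l with
  | nil => intro acc s; simp
  | cons x xs ih =>
    intro acc s
    simp only [List.foldl_cons]
    rw [ih]
    refine Prod.ext ?_ ?_
    · simp only [List.length_cons, List.range_succ_eq_map, List.map_cons, List.map_map,
        Function.comp_def, List.take_succ_cons, List.sum_cons, List.append_assoc]
      simp [List.cons_append, add_assoc]
    · simp [add_assoc]

lemma prefix_sums_eq (l : List Int) :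
    prefix_sums l = (List.range (l.length + 1)).map (fun k => (l.take k).sum) := by
  unfold prefix_sums
  rw [prefix_sums_aux]
  simp only [List.range_succ_eq_map, List.map_cons, List.map_map, Function.comp_def]
  simp

lemma prefix_sums_getD (l : List Int) (k : Nat) (hk : k ≤ l.length) :
    (prefix_sums l).getD k 0 = (l.take k).sum := by
  rw [prefix_sums_eq, List.getD_eq_getElem?_getD, List.getElem?_map, List.getElem?_range (by omega)]
  simp

lemma everyOther_eq (l : List Int) :
    everyOther l = (List.range ((l.length + 1) / 2)).map (fun j => l.getD (2 * j) 0) := by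
  induction l using everyOther.induct with
  | case1 => simp [everyOther]
  | case2 x => simp [everyOther]
  | case3 x y xs ih =>
    show x :: everyOther xs = _
    rw [ih]
    have h : ((x :: y :: xs).length + 1) / 2 = (xs.length + 1) / 2 + 1 := by
      simp only [List.length_cons]; omega
    rw [h, List.range_succ_eq_map, List.map_cons, List.map_map]
    simp only [Function.comp_def, Nat.succ_eq_add_one]
    refine List.cons_eq_cons.2 ⟨rfl, ?_⟩
    apply List.map_congr_left
    intro j _
    have : 2 * (j + 1) = 2 * j + 1 + 1 := by omega
    rw [this]
    simp

lemma pairs_getD (l : List Int) (j : Nat) (hj : j + 1 < l.length) :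
    (List.zipWith (· + ·) (l.drop 1) l).getD j 0 = l.getD (j + 1) 0 + l.getD j 0 := by
  have hl : j < (List.zipWith (· + ·) (l.drop 1) l).length := by
    rw [List.length_zipWith, List.length_drop]; omega
  rw [List.getD_eq_getElem _ _ hl, List.getD_eq_getElem _ _ (by omega),
      List.getD_eq_getElem _ _ (by omega), List.getElem_zipWith]
  congr 1
  rw [List.getElem_drop]
  congr 1
  omega

lemma map_range_tail (g : Nat → Int) (k : Nat) :
    ((List.range (k + 1)).map g).drop 1 = (List.range k).map (fun i => g (i + 1)) := by
  rw [List.range_succ_eq_map]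
  simp [List.map_map, Function.comp_def]

lemma getD_map_range' (f : Nat → Int) (m k : Nat) (h : k < m) :
    ((List.range m).map f).getD k 0 = f k := by
  rw [List.getD_eq_getElem?_getD, List.getElem?_map, List.getElem?_range h]; rfl

lemma foldl_pyRange_eq_stepN {σ : Type} (f : σ → Int → σ) (step : σ → σ) (a : Int) :
    ∀ (n : Nat) (st : σ),
      (∀ k : Nat, k < n → f (stepN step k st) (a + k) = step (stepN step k st)) →
      (PySem.List.pyRange a (a + n)).foldl f st = stepN step n st := by
  intro n
  induction n with
  | zero => intro st _; simp [PySem.List.pyRange_one_eq_nil (le_refl a), stepN]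
  | succ n ih =>
    intro st h
    rw [show a + ((n + 1 : Nat) : Int) = (a + n) + 1 by push_cast; ring,
        PySem.List.pyRange_one_succ_right (by omega : a ≤ a + (n : Int)),
        List.foldl_append, ih st (fun k hk => h k (by omega))]
    simpa [stepN] using h n (by omega)

lemma partition_eq (items : List (Int × Int)) :
    items.foldl aPartStep ([], []) =
      ((items.filter (fun wc => wc.1 == 1)).map (·.2),
       (items.filter (fun wc => wc.1 != 1)).map (·.2)) := by
  have hb : aPartStep = fun (s : List Int × List Int) wc =>
      (if wc.1 == 1 then s.1 ++ [wc.2] else s.1,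
       if wc.1 != 1 then s.2 ++ [wc.2] else s.2) := by
    funext s wc
    by_cases h : wc.1 == 1 <;> simp [aPartStep, h] <;> simp_all
  rw [hb,
    PySem.List.foldl_prod_mk
      (fun a (wc : Int × Int) => if wc.1 == 1 then a ++ [wc.2] else a)
      (fun b (wc : Int × Int) => if wc.1 != 1 then b ++ [wc.2] else b),
    PySem.List.foldl_append_if, PySem.List.foldl_append_if]
  simp

lemma aStep1_eq_stepA (s : List Int × List Int × List Int) (h : 2 ≤ s.2.2.length) :
    aStep1 s (s.2.2.length : Int) = stepA s := by
  have h1 : (PySem.Int.mod (s.2.2.length : Int) 2 == 0) = (s.2.2.length % 2 == 0) := by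
    rw [show ((s.2.2.length : Int)) = ((s.2.2.length : Nat) : Int) from rfl,
        show (2 : Int) = ((2 : Nat) : Int) from rfl, PySem.Int.mod_natCast]
    rcases Nat.mod_two_eq_zero_or_one s.2.2.length with hm | hm <;> rw [hm] <;> rfl
  have h2 : ((s.2.2.length : Int) - 2) = ((s.2.2.length - 2 : Nat) : Int) := by omega
  unfold aStep1 stepA
  rw [h1, h2, PySem.List.pyGetD_natCast]

lemma aStep2_eq_stepC (s : List Int × List Int) (h : 2 ≤ s.2.length) :
    aStep2 s (s.2.length : Int) = stepC s := by
  have h1 : (PySem.Int.mod (s.2.length : Int) 2 == 0) = (s.2.length % 2 == 0) := by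
    rw [show ((s.2.length : Int)) = ((s.2.length : Nat) : Int) from rfl,
        show (2 : Int) = ((2 : Nat) : Int) from rfl, PySem.Int.mod_natCast]
    rcases Nat.mod_two_eq_zero_or_one s.2.length with hm | hm <;> rw [hm] <;> rfl
  have h2 : ((s.2.length : Int) - 2) = ((s.2.length - 2 : Nat) : Int) := by omega
  have h3 : ((s.2.length : Int) - 1) = ((s.2.length - 1 : Nat) : Int) := by omega
  unfold aStep2 stepC
  rw [h1, h2, h3, PySem.List.pyGetD_natCast, PySem.List.pyGetD_natCast]

lemma stepA_loop (E' O' : List Int) (r1 : Int) :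
    ∀ n : Nat, (n + 1) / 2 ≤ E'.length → n / 2 ≤ O'.length →
      stepN stepA n (E'.reverse, O'.reverse, [0, r1]) =
        ((E'.drop ((n + 1) / 2)).reverse, (O'.drop (n / 2)).reverse,
         (List.range (n + 2)).map (gA E' O' r1)) := by
  intro n
  induction n with
  | zero =>
    intro _ _
    simp only [stepN, Nat.zero_add, Nat.reduceDiv, List.drop_zero]
    refine Prod.ext rfl (Prod.ext rfl ?_)
    show [0, r1] = (List.range 2).map (gA E' O' r1)
    have g0 : gA E' O' r1 0 = (prefix_sums E').getD 0 0 := rfl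
    have g1 : gA E' O' r1 1 = r1 + (prefix_sums O').getD 0 0 := rfl
    rw [prefix_sums_getD E' 0 (by omega)] at g0
    rw [prefix_sums_getD O' 0 (by omega)] at g1
    simp at g0 g1
    simp [List.range_succ, g0, g1]
  | succ n ih =>
    intro hE hO
    rw [show stepN stepA (n+1) (E'.reverse, O'.reverse, [0, r1])
          = stepA (stepN stepA n (E'.reverse, O'.reverse, [0, r1])) from rfl,
        ih (by omega) (by omega)]
    unfold stepA
    simp only [List.length_map, List.length_range]
    rcases Nat.mod_two_eq_zero_or_one n with hpar | hpar
    · -- n even: pop the even stream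
      have hc : n / 2 < E'.length := by omega
      have hd1 : (n + 1) / 2 = n / 2 := by omega
      rw [if_pos (by rw [show (n+2) % 2 = 0 by omega]; rfl)]
      rw [hd1, List.drop_eq_getElem_cons hc, List.reverse_cons, PySem.List.pop?_last]
      simp only []
      refine Prod.ext ?_ (Prod.ext ?_ ?_)
      · show (E'.drop (n/2 + 1)).reverse = (E'.drop ((n + 1 + 1) / 2)).reverse
        rw [show (n + 1 + 1) / 2 = n / 2 + 1 by omega]
      · rfl
      · show (List.range (n+2)).map (gA E' O' r1)
            ++ [((List.range (n+2)).map (gA E' O' r1)).getD (n + 2 - 2) 0 + E'[n/2]]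
          = (List.range (n + 1 + 2)).map (gA E' O' r1)
        rw [show n + 2 - 2 = n from rfl, getD_map_range' _ _ _ (by omega)]
        conv_rhs => rw [show n + 1 + 2 = (n + 2) + 1 by omega, List.range_succ, List.map_append]
        refine congrArg _ ?_
        have hgn : gA E' O' r1 n = (prefix_sums E').getD (n / 2) 0 := by
          unfold gA; rw [if_pos (by rw [hpar]; rfl)]
        have hgn2 : gA E' O' r1 (n + 2) = (prefix_sums E').getD (n / 2 + 1) 0 := by
          unfold gA
          rw [if_pos (by rw [show (n+2) % 2 = 0 by omega]; rfl),
              show (n + 2) / 2 = n / 2 + 1 by omega]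
        rw [List.map_cons, List.map_nil, hgn, hgn2,
            prefix_sums_getD E' _ (by omega), prefix_sums_getD E' _ (by omega),
            List.sum_take_succ E' (n/2) hc]
    · -- n odd: pop the odd stream
      have hc : n / 2 < O'.length := by omega
      have hd1 : (n + 1) / 2 = n / 2 + 1 := by omega
      rw [if_neg (by rw [show (n+2) % 2 = 1 by omega]; simp)]
      rw [List.drop_eq_getElem_cons hc, List.reverse_cons, PySem.List.pop?_last]
      simp only []
      refine Prod.ext ?_ (Prod.ext ?_ ?_)
      · show (E'.drop ((n+1)/2)).reverse = (E'.drop ((n + 1 + 1) / 2)).reverse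
        rw [show (n + 1 + 1) / 2 = (n + 1) / 2 by omega]
      · show (O'.drop (n/2 + 1)).reverse = (O'.drop ((n + 1) / 2)).reverse
        rw [hd1]
      · show (List.range (n+2)).map (gA E' O' r1)
            ++ [((List.range (n+2)).map (gA E' O' r1)).getD (n + 2 - 2) 0 + O'[n/2]]
          = (List.range (n + 1 + 2)).map (gA E' O' r1)
        rw [show n + 2 - 2 = n from rfl, getD_map_range' _ _ _ (by omega)]
        conv_rhs => rw [show n + 1 + 2 = (n + 2) + 1 by omega, List.range_succ, List.map_append]
        refine congrArg _ ?_
        have hgn : gA E' O' r1 n = r1 + (prefix_sums O').getD (n / 2) 0 := by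
          unfold gA
          rw [if_neg (by rw [hpar]; simp), show (n - 1) / 2 = n / 2 by omega]
        have hgn2 : gA E' O' r1 (n + 2) = r1 + (prefix_sums O').getD (n / 2 + 1) 0 := by
          unfold gA
          rw [if_neg (by rw [show (n+2) % 2 = 1 by omega]; simp),
              show (n + 2 - 1) / 2 = n / 2 + 1 by omega]
        rw [List.map_cons, List.map_nil, hgn, hgn2,
            prefix_sums_getD O' _ (by omega), prefix_sums_getD O' _ (by omega),
            List.sum_take_succ O' (n/2) hc]
        ring_nf

lemma stepC_loop (T' : List Int) :
    ∀ n : Nat, (n + 1) / 2 ≤ T'.length →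
      stepN stepC n (T'.reverse, [0, 0]) =
        ((T'.drop ((n + 1) / 2)).reverse, (List.range (n + 2)).map (hC T')) := by
  intro n
  induction n with
  | zero =>
    intro _
    simp only [stepN, Nat.zero_add, Nat.reduceDiv, List.drop_zero]
    refine Prod.ext rfl ?_
    show [0, 0] = (List.range 2).map (hC T')
    have g0 : hC T' 0 = (prefix_sums (T'.map (fun t => max t 0))).getD 0 0 := rfl
    have g1 : hC T' 1 = (prefix_sums (T'.map (fun t => max t 0))).getD 0 0 := rfl
    rw [prefix_sums_getD _ 0 (by omega)] at g0 g1
    simp at g0 g1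
    simp [List.range_succ, g0, g1]
  | succ n ih =>
    intro hT
    rw [show stepN stepC (n+1) (T'.reverse, [0, 0])
          = stepC (stepN stepC n (T'.reverse, [0, 0])) from rfl, ih (by omega)]
    unfold stepC
    simp only [List.length_map, List.length_range]
    have hM : (T'.map (fun t => max t 0)).length = T'.length := by simp
    rcases Nat.mod_two_eq_zero_or_one n with hpar | hpar
    · -- n even: pop
      have hc : n / 2 < T'.length := by omega
      have hd1 : (n + 1) / 2 = n / 2 := by omega
      rw [if_pos (by rw [show (n+2) % 2 = 0 by omega]; rfl)]
      rw [hd1, List.drop_eq_getElem_cons hc, List.reverse_cons, PySem.List.pop?_last]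
      simp only []
      refine Prod.ext ?_ ?_
      · show (T'.drop (n/2 + 1)).reverse = (T'.drop ((n + 1 + 1) / 2)).reverse
        rw [show (n + 1 + 1) / 2 = n / 2 + 1 by omega]
      · show (List.range (n+2)).map (hC T')
            ++ [max (((List.range (n+2)).map (hC T')).getD (n + 2 - 2) 0 + T'[n/2])
                    (((List.range (n+2)).map (hC T')).getD (n + 2 - 1) 0)]
          = (List.range (n + 1 + 2)).map (hC T')
        rw [show n + 2 - 2 = n from rfl, show n + 2 - 1 = n + 1 from rfl,
            getD_map_range' _ _ _ (by omega), getD_map_range' _ _ _ (by omega)]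
        conv_rhs => rw [show n + 1 + 2 = (n + 2) + 1 by omega, List.range_succ, List.map_append]
        refine congrArg _ ?_
        have hgn : hC T' n = (prefix_sums (T'.map (fun t => max t 0))).getD (n / 2) 0 := rfl
        have hgn1 : hC T' (n + 1) = (prefix_sums (T'.map (fun t => max t 0))).getD (n / 2) 0 := by
          unfold hC; rw [show (n + 1) / 2 = n / 2 by omega]
        have hgn2 : hC T' (n + 2) = (prefix_sums (T'.map (fun t => max t 0))).getD (n / 2 + 1) 0 := by
          unfold hC; rw [show (n + 2) / 2 = n / 2 + 1 by omega]
        rw [List.map_cons, List.map_nil, hgn, hgn1, hgn2,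
            prefix_sums_getD _ _ (by omega), prefix_sums_getD _ _ (by omega),
            List.sum_take_succ _ (n/2) (by omega)]
        have hx : (T'.map (fun t => max t 0))[n/2]'(by omega) = max (T'[n/2]'hc) 0 := by
          simp
        rw [hx]
        congr 1
        omega
    · -- n odd: temp = 0
      have hk : n / 2 + 1 ≤ T'.length := by omega
      rw [if_neg (by rw [show (n+2) % 2 = 1 by omega]; simp)]
      refine Prod.ext ?_ ?_
      · show (T'.drop ((n+1)/2)).reverse = (T'.drop ((n + 1 + 1) / 2)).reverse
        rw [show (n + 1 + 1) / 2 = (n + 1) / 2 by omega]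
      · show (List.range (n+2)).map (hC T')
            ++ [max (((List.range (n+2)).map (hC T')).getD (n + 2 - 2) 0 + 0)
                    (((List.range (n+2)).map (hC T')).getD (n + 2 - 1) 0)]
          = (List.range (n + 1 + 2)).map (hC T')
        rw [show n + 2 - 2 = n from rfl, show n + 2 - 1 = n + 1 from rfl,
            getD_map_range' _ _ _ (by omega), getD_map_range' _ _ _ (by omega)]
        conv_rhs => rw [show n + 1 + 2 = (n + 2) + 1 by omega, List.range_succ, List.map_append]
        refine congrArg _ ?_
        have hgn : hC T' n = (prefix_sums (T'.map (fun t => max t 0))).getD (n / 2) 0 := rfl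
        have hgn1 : hC T' (n + 1) = (prefix_sums (T'.map (fun t => max t 0))).getD (n / 2 + 1) 0 := by
          unfold hC; rw [show (n + 1) / 2 = n / 2 + 1 by omega]
        have hgn2 : hC T' (n + 2) = (prefix_sums (T'.map (fun t => max t 0))).getD (n / 2 + 1) 0 := by
          unfold hC; rw [show (n + 2) / 2 = n / 2 + 1 by omega]
        rw [List.map_cons, List.map_nil, hgn, hgn1, hgn2,
            prefix_sums_getD _ _ (by omega), prefix_sums_getD _ _ (by omega),
            List.sum_take_succ _ (n/2) (by omega)]
        have hx : (T'.map (fun t => max t 0))[n/2]'(by omega) = max (T'[n/2]'(by omega)) 0 := by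
          simp
        rw [hx]
        congr 1
        have hnn : (0:Int) ≤ max (T'[n/2]'(by omega)) 0 := le_max_right _ _
        omega

lemma pairsLoop (l twA twB : List Int) :
    ∀ m : Nat, m ≤ l.length →
      (PySem.List.pyRange 1 (m : Int)).foldl (aPairStep l) (twA, twB) =
        (twA ++ (List.range (m / 2)).map (fun j => l.getD (2 * j + 1) 0 + l.getD (2 * j) 0),
         twB ++ (List.range ((m - 1) / 2)).map (fun j => l.getD (2 * j + 2) 0 + l.getD (2 * j + 1) 0)) := by
  intro m
  induction m with
  | zero => intro _; simp [PySem.List.pyRange_one_eq_nil (by omega : (0:Int) ≤ 1)]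
  | succ m ih =>
    intro hm
    rcases Nat.eq_zero_or_pos m with hm0 | hm1
    · subst hm0
      simp [PySem.List.pyRange_one_eq_nil (by omega : (1:Int) ≤ 1)]
    · rw [show ((m + 1 : Nat) : Int) = (m : Int) + 1 by push_cast; ring,
          PySem.List.pyRange_one_succ_right (by omega : (1:Int) ≤ (m : Int)),
          List.foldl_append, ih (by omega)]
      have hstep : aPairStep l
          (twA ++ (List.range (m / 2)).map (fun j => l.getD (2 * j + 1) 0 + l.getD (2 * j) 0),
           twB ++ (List.range ((m - 1) / 2)).map (fun j => l.getD (2 * j + 2) 0 + l.getD (2 * j + 1) 0))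
          (m : Int) =
        (twA ++ (List.range ((m + 1) / 2)).map (fun j => l.getD (2 * j + 1) 0 + l.getD (2 * j) 0),
         twB ++ (List.range ((m + 1 - 1) / 2)).map (fun j => l.getD (2 * j + 2) 0 + l.getD (2 * j + 1) 0)) := by
        have hmod : (PySem.Int.mod (m : Int) 2 == 1) = (m % 2 == 1) := by
          rw [show (2 : Int) = ((2 : Nat) : Int) from rfl, PySem.Int.mod_natCast]
          rcases Nat.mod_two_eq_zero_or_one m with hp | hp <;> rw [hp] <;> rfl
        have hg1 : PySem.List.pyGetD l (m : Int) 0 = l.getD m 0 := PySem.List.pyGetD_natCast l m 0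
        have hg2 : PySem.List.pyGetD l ((m : Int) - 1) 0 = l.getD (m - 1) 0 := by
          rw [show ((m : Int) - 1) = ((m - 1 : Nat) : Int) by omega, PySem.List.pyGetD_natCast]
        unfold aPairStep
        rw [hmod, hg1, hg2]
        rcases Nat.mod_two_eq_zero_or_one m with hp | hp
        · -- m even (m ≥ 2): appended to the odd-side list
          rw [if_neg (by rw [hp]; simp)]
          refine Prod.ext ?_ ?_
          · show twA ++ _ = twA ++ _
            rw [show (m + 1) / 2 = m / 2 by omega]
          · show twB ++ _ ++ [l.getD m 0 + l.getD (m - 1) 0] = twB ++ _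
            rw [List.append_assoc]
            refine congrArg _ ?_
            conv_rhs => rw [show (m + 1 - 1) / 2 = ((m - 2) / 2) + 1 by omega, List.range_succ,
              List.map_append]
            rw [show (m - 1) / 2 = (m - 2) / 2 by omega]
            refine congrArg _ ?_
            rw [List.map_cons, List.map_nil,
                show 2 * ((m - 2) / 2) + 2 = m by omega, show 2 * ((m - 2) / 2) + 1 = m - 1 by omega]
        · -- m odd: appended to the even-side list
          rw [if_pos (by rw [hp]; rfl)]
          refine Prod.ext ?_ ?_
          · show twA ++ _ ++ [l.getD m 0 + l.getD (m - 1) 0] = twA ++ _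
            rw [List.append_assoc]
            refine congrArg _ ?_
            conv_rhs => rw [show (m + 1) / 2 = m / 2 + 1 by omega, List.range_succ, List.map_append]
            refine congrArg _ ?_
            rw [List.map_cons, List.map_nil,
                show 2 * (m / 2) + 1 = m by omega, show 2 * (m / 2) = m - 1 by omega]
          · show twB ++ _ = twB ++ _
            rw [show (m + 1 - 1) / 2 = (m - 1) / 2 by omega]
      simpa using hstep

-- ===== VERDICT (by name: the statement is the Claim_ definition above) =====
theorem calculate_max_costs_spec : Claim_equal_calculate_max_costs := by
  intro N items _
  unfold Spec_calculate_max_costs calculate_max_costs calculate_max_costs_alt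
  rw [partition_eq]
  dsimp only []
  set os := (items.filter (fun wc => wc.1 == 1)).map (·.2) with hosdef
  set ts := (items.filter (fun wc => wc.1 != 1)).map (·.2) with htsdef
  by_cases hone : os = []
  · -- no weight-1 items
    rw [if_neg (by rw [hone]; simp), if_neg (by rw [hone]; simp)]
    by_cases hts : ts = []
    · rw [hone, hts]
      norm_num [PySem.List.pyRange_one_eq_nil, prefix_sums]
      rw [show PySem.List.sorted ([]:List Int) (fun x => x) true = [] by
        rw [PySem.List.sorted_eq_nil_iff]]
      simp
    · -- some weight-2 items, no weight-1
      have htl : 1 ≤ ts.length := by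
        have := List.length_pos_iff.2 hts; omega
      set T' := PySem.List.sorted ts (fun x => x) true with hT'def
      have hT'len : T'.length = ts.length := by rw [hT'def, PySem.List.length_sorted]
      have hsasc : PySem.List.sorted ts (fun x => x) false = T'.reverse := by
        rw [hT'def, sorted_true_eq_rev, List.reverse_reverse]
      rw [hone, hsasc]
      set n := 2 * ts.length - 1 with hndef
      rw [show (↑(List.length ([] : List Int)) + 2 * (ts.length : Int) + 1)
            = (2 : Int) + (n : Int) by simp; omega]
      have hagree : ∀ k : Nat, k < n →
          aStep2 (stepN stepC k (T'.reverse, [0, 0])) (2 + (k : Int))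
            = stepC (stepN stepC k (T'.reverse, [0, 0])) := by
        intro k hk
        rw [stepC_loop T' k (by omega)]
        have hlen : (((T'.drop ((k + 1) / 2)).reverse,
            (List.range (k + 2)).map (hC T')) : List Int × List Int).2.length = k + 2 := by simp
        have := aStep2_eq_stepC ((T'.drop ((k + 1) / 2)).reverse,
            (List.range (k + 2)).map (hC T')) (by rw [hlen]; omega)
        rw [hlen] at this
        rw [show (2 : Int) + (k : Int) = ((k + 2 : Nat) : Int) by push_cast; ring]
        exact this
      rw [foldl_pyRange_eq_stepN aStep2 stepC 2 n (T'.reverse, [0, 0]) hagree,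
          stepC_loop T' n (by omega)]
      rw [show n + 2 = (2 * ts.length) + 1 by omega, map_range_tail]
      rw [show max (List.length ([] : List Int) + 2 * ts.length) 1 = 2 * ts.length by simp; omega]
      rfl
  · -- some weight-1 items
    have hol : 1 ≤ os.length := by
      have := List.length_pos_iff.2 hone; omega
    rw [if_pos hol, if_pos (by simp [hone])]
    set ones1 := PySem.List.sorted (os ++ [0]) (fun x => x) true with h1def
    have hL : ones1.length = os.length + 1 := by
      rw [h1def, PySem.List.length_sorted]; simp
    set pairs := List.zipWith (· + ·) (ones1.drop 1) ones1 with hpdef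
    have hpl : pairs.length = os.length := by
      rw [hpdef, List.length_zipWith, List.length_drop, hL]; omega
    have hEv : everyOther pairs
        = (List.range (ones1.length / 2)).map
            (fun j => ones1.getD (2 * j + 1) 0 + ones1.getD (2 * j) 0) := by
      rw [everyOther_eq, show (pairs.length + 1) / 2 = ones1.length / 2 by omega]
      apply List.map_congr_left
      intro j hj
      rw [List.mem_range] at hj
      rw [hpdef]
      exact pairs_getD ones1 (2 * j) (by omega)
    have hOd : everyOther (pairs.drop 1)
        = (List.range ((ones1.length - 1) / 2)).map
            (fun j => ones1.getD (2 * j + 2) 0 + ones1.getD (2 * j + 1) 0) := by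
      rw [everyOther_eq, show ((pairs.drop 1).length + 1) / 2 = (ones1.length - 1) / 2 by
            rw [List.length_drop]; omega]
      apply List.map_congr_left
      intro j hj
      rw [List.mem_range] at hj
      have hd : (pairs.drop 1).getD (2 * j) 0 = pairs.getD (2 * j + 1) 0 := by
        rw [List.getD_eq_getElem?_getD, List.getElem?_drop, List.getD_eq_getElem?_getD,
            show 1 + 2 * j = 2 * j + 1 by omega]
      rw [hd, hpdef]
      exact pairs_getD ones1 (2 * j + 1) (by omega)
    rw [pairsLoop ones1 ts ts ones1.length (le_refl _), ← hEv, ← hOd]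
    set E' := PySem.List.sorted (ts ++ everyOther pairs) (fun x => x) true with hE'def
    set O' := PySem.List.sorted (ts ++ everyOther (pairs.drop 1)) (fun x => x) true with hO'def
    have hE'len : E'.length = ts.length + ones1.length / 2 := by
      rw [hE'def, PySem.List.length_sorted, List.length_append, hEv]; simp
    have hO'len : O'.length = ts.length + (ones1.length - 1) / 2 := by
      rw [hO'def, PySem.List.length_sorted, List.length_append, hOd]; simp
    have hsaE : PySem.List.sorted (ts ++ everyOther pairs) (fun x => x) false = E'.reverse := by
      rw [hE'def, sorted_true_eq_rev, List.reverse_reverse]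
    have hsaO : PySem.List.sorted (ts ++ everyOther (pairs.drop 1)) (fun x => x) false
        = O'.reverse := by
      rw [hO'def, sorted_true_eq_rev, List.reverse_reverse]
    rw [hsaE, hsaO, PySem.List.pyGetD_zero]
    set r1 := ones1.getD 0 0 with hr1def
    set n := os.length + 2 * ts.length - 1 with hndef
    rw [show ((os.length : Int) + 2 * (ts.length : Int) + 1) = (2 : Int) + (n : Int) by omega]
    have hbE : (n + 1) / 2 ≤ E'.length := by rw [hE'len]; omega
    have hbO : n / 2 ≤ O'.length := by rw [hO'len]; omega
    have hagree : ∀ k : Nat, k < n →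
        aStep1 (stepN stepA k (E'.reverse, O'.reverse, [0, r1])) (2 + (k : Int))
          = stepA (stepN stepA k (E'.reverse, O'.reverse, [0, r1])) := by
      intro k hk
      rw [stepA_loop E' O' r1 k (by rw [hE'len]; omega) (by rw [hO'len]; omega)]
      have hlen : (((E'.drop ((k + 1) / 2)).reverse, (O'.drop (k / 2)).reverse,
          (List.range (k + 2)).map (gA E' O' r1)) : List Int × List Int × List Int).2.2.length
            = k + 2 := by simp
      have := aStep1_eq_stepA ((E'.drop ((k + 1) / 2)).reverse, (O'.drop (k / 2)).reverse,
          (List.range (k + 2)).map (gA E' O' r1)) (by rw [hlen]; omega)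
      rw [hlen] at this
      rw [show (2 : Int) + (k : Int) = ((k + 2 : Nat) : Int) by push_cast; ring]
      exact this
    rw [foldl_pyRange_eq_stepN aStep1 stepA 2 n (E'.reverse, O'.reverse, [0, r1]) hagree,
        stepA_loop E' O' r1 n hbE hbO]
    rw [show n + 2 = (os.length + 2 * ts.length) + 1 by omega, map_range_tail]
    rw [show max (os.length + 2 * ts.length) 1 = os.length + 2 * ts.length by omega]
    rfl
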